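-- pv_equiv track=rewrite | github.com/thobho/aoc-2023 | day1.py | process_line_backward
-- ===== SOURCE A (Python) =====
-- tokens = {
--     '1': 1,
--     '2': 2,
--     '3': 3,
--     '4': 4,
--     '5': 5,
--     '6': 6,
--     '7': 7,
--     '8': 8,
--     '9': 9,
--     'one': 1,
--     'two': 2,
--     'three': 3,
--     'four': 4,
--     'five': 5,
--     'six': 6,
--     'seven': 7,
--     'eight': 8,
--     'nine': 9,
-- }
--
-- def process_token_end(text: str):
--     for token_key, token_value in tokens.items():
--         if text.endswith(token_key):
--             return (text[0:-len(token_key)], token_value)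
--     return (text[0:-1], None)
--
-- def process_line_backward(text: str):
--     currently_processing = text
--     while len(currently_processing) > 0:
--         (substring, number) = process_token_end(currently_processing)
--         currently_processing = substring
--         if number is not None:
--             return number
--     return None
-- ===== SOURCE B (Python) =====
-- tokens = {
--     '1': 1,
--     '2': 2,
--     '3': 3,
--     '4': 4,
--     '5': 5,
--     '6': 6,
--     '7': 7,
--     '8': 8,
--     '9': 9,
--     'one': 1,
--     'two': 2,
--     'three': 3,
--     'four': 4,
--     'five': 5,
--     'six': 6,
--     'seven': 7,
--     'eight': 8,
--     'nine': 9,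
-- }
--
-- def process_line_backward(text: str):
--     best_end = -1
--     best_value = None
--     for token, value in tokens.items():
--         start = text.rfind(token)
--         if start != -1 and start + len(token) > best_end:
--             best_end = start + len(token)
--             best_value = value
--     return best_value
-- ===== Notes on version B (the rewrite author's own statement) =====
-- stated objective: faster
-- what changed: Replaces A's per-character suffix-stripping loop (which copies text[0:-1] on every step) by one text.rfind per token plus a running max over end positions (rfind index + token length), keeping the first token in dict order on equal ends.
import Mathlib
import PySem

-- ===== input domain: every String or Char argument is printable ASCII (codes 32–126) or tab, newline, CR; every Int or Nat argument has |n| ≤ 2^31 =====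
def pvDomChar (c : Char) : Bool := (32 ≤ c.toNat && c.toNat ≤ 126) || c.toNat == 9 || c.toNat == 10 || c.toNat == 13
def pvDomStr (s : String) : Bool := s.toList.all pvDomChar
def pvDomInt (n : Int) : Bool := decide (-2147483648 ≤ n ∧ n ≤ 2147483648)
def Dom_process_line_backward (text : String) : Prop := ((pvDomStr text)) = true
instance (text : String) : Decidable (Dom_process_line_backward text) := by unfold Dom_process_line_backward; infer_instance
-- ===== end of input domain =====

-- B replaces A's per-character suffix-stripping loop (which re-slices the string each step) by one
-- rfind per token plus a running maximum over end positions; both return the value of the token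
-- ending last (first in dict order on equal ends).

-- ===== PORT A =====
-- the module-level 'tokens' dict (insertion order)
def tokensTable : List (String × Int) :=
  [("1",1),("2",2),("3",3),("4",4),("5",5),("6",6),("7",7),("8",8),("9",9),
   ("one",1),("two",2),("three",3),("four",4),("five",5),("six",6),("seven",7),("eight",8),("nine",9)]

-- port of process_token_end: scan the token dict in order; on a suffix match strip it, else strip one char
def processTokenEnd (ts : List (String × Int)) (text : String) : String × Option Int :=
  match ts with
  | [] => (PySem.Str.slice text (some 0) (some (-1)), none)
  | (token_key, token_value) :: rest =>
    if PySem.Str.endswith text token_key then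
      (PySem.Str.slice text (some 0) (some (-(PySem.Str.len token_key))), some token_value)
    else processTokenEnd rest text

-- termination helper for the port: when no token matched, the remainder is text[0:-1]
theorem processTokenEnd_none_fst (ts : List (String × Int)) (text : String)
    (h : (processTokenEnd ts text).2 = none) :
    (processTokenEnd ts text).1 = PySem.Str.slice text (some 0) (some (-1)) := by
  induction ts with
  | nil => rfl
  | cons tv rest ih =>
    obtain ⟨k, v⟩ := tv
    by_cases he : PySem.Str.endswith text k
    · simp [processTokenEnd, PySem.Str.endswith_eq] at he
      simp [processTokenEnd, he] at h
    · simp [processTokenEnd, PySem.Str.endswith_eq] at he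
      simp only [processTokenEnd, PySem.Str.endswith_eq, he, Bool.false_eq_true, ↓reduceIte] at h ⊢
      exact ih h

def process_line_backward (text : String) : Option Int :=
  if h0 : 0 < PySem.Str.len text then
    match h : processTokenEnd tokensTable text with
    | (_, some number) => some number
    | (substring, none) => process_line_backward substring
  else none
termination_by text.toList.length
decreasing_by
  have h2 : (processTokenEnd tokensTable text).2 = none := by rw [h]
  have h1 := processTokenEnd_none_fst tokensTable text h2
  rw [h] at h1
  simp only at h1
  subst h1
  rw [PySem.Str.len_eq] at h0
  have hlen : (PySem.Str.slice text (some 0) (some (-1))).toList = text.toList.dropLast := by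
    simp [PySem.Str.toList_slice, PySem.List.slice_zero_start, PySem.List.slice_to_neg_one]
  rw [hlen, List.length_dropLast]
  omega

-- ===== PORT B =====
-- one loop iteration of B: try token tv, keep it if it ends strictly later than the best so far
def bstep (text : String) (st : Int × Option Int) (tv : String × Int) : Int × Option Int :=
  let start := PySem.Str.rfind text tv.1
  if start ≠ -1 ∧ start + PySem.Str.len tv.1 > st.1
  then (start + PySem.Str.len tv.1, some tv.2) else st

def process_line_backward_alt (text : String) : Option Int :=
  (tokensTable.foldl (bstep text) (-1, none)).2

-- ===== PRECONDITION & SPEC =====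
def Spec_process_line_backward (text : String) (out : Option Int) : Prop := out = process_line_backward_alt text
instance (text : String) (out : Option Int) : Decidable (Spec_process_line_backward text out) := by unfold Spec_process_line_backward; infer_instance

-- ===== CLAIM (what is proved, stated in full; the proofs are below) =====
def Claim_equal_process_line_backward : Prop := ∀ (text : String), Dom_process_line_backward text → Spec_process_line_backward text (process_line_backward text)

-- ===== LEMMAS AND PROOFS =====

-- characterisation of PySem.Chars.rfind.go: -1 iff no occurrence at index ≤ i, else the largest start ≤ i
theorem rfind_go_cases (s sub : List Char) (i : Nat) :
    (PySem.Chars.rfind.go s sub i = -1 ∧ ∀ j ≤ i, ¬ sub <+: s.drop j) ∨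
    (∃ j : Nat, PySem.Chars.rfind.go s sub i = (j : Int) ∧ j ≤ i ∧ sub <+: s.drop j ∧
      ∀ k, j < k → k ≤ i → ¬ sub <+: s.drop k) := by
  induction i with
  | zero =>
    by_cases hp : sub <+: s
    · right
      exact ⟨0, by simp [PySem.Chars.rfind.go, List.isPrefixOf_iff_prefix, hp], le_refl 0, by simpa using hp,
        fun k hk hk' => absurd (lt_of_lt_of_le hk hk') (lt_irrefl _)⟩
    · left
      refine ⟨by simp [PySem.Chars.rfind.go, List.isPrefixOf_iff_prefix, hp], ?_⟩
      intro j hj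
      interval_cases j
      simpa using hp
  | succ m ih =>
    by_cases hp : sub <+: s.drop (m + 1)
    · right
      exact ⟨m + 1, by simp [PySem.Chars.rfind.go, List.isPrefixOf_iff_prefix, hp], le_refl _, hp,
        fun k hk hk' => absurd (lt_of_lt_of_le hk hk') (lt_irrefl _)⟩
    · have hgo : PySem.Chars.rfind.go s sub (m + 1) = PySem.Chars.rfind.go s sub m := by
        simp [PySem.Chars.rfind.go, List.isPrefixOf_iff_prefix, hp]
      rcases ih with ⟨h1, h2⟩ | ⟨j, hj, hle, hpre, hmax⟩
      · left
        refine ⟨by rw [hgo]; exact h1, ?_⟩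
        intro j hj
        rcases Nat.lt_or_ge j (m + 1) with h | h
        · exact h2 j (by omega)
        · have : j = m + 1 := by omega
          subst this; exact hp
      · right
        refine ⟨j, by rw [hgo]; exact hj, by omega, hpre, ?_⟩
        intro k hk hk'
        rcases Nat.lt_or_ge k (m + 1) with h | h
        · exact hmax k hk (by omega)
        · have : k = m + 1 := by omega
          subst this; exact hp

-- characterisation of PySem.Chars.rfind for a nonempty needle
theorem rfind_cases (s sub : List Char) (hsub : sub ≠ []) :
    (PySem.Chars.rfind s sub = -1 ∧ ∀ j, ¬ sub <+: s.drop j) ∨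
    (∃ j : Nat, PySem.Chars.rfind s sub = (j : Int) ∧ j + sub.length ≤ s.length ∧ sub <+: s.drop j ∧
      ∀ k, j < k → ¬ sub <+: s.drop k) := by
  have hnil : ∀ j, s.length < j → ¬ sub <+: s.drop j := by
    intro j hj hpre
    rw [List.drop_eq_nil_of_le (by omega)] at hpre
    exact hsub (List.prefix_nil.mp hpre)
  rcases rfind_go_cases s sub s.length with ⟨h1, h2⟩ | ⟨j, hj, hle, hpre, hmax⟩
  · left
    refine ⟨h1, fun j => ?_⟩
    rcases Nat.lt_or_ge s.length j with h | h
    · exact hnil j h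
    · exact h2 j h
  · right
    have hlen : sub.length ≤ (s.drop j).length := hpre.length_le
    simp only [List.length_drop] at hlen
    refine ⟨j, hj, by omega, hpre, fun k hk => ?_⟩
    rcases Nat.lt_or_ge s.length k with h | h
    · exact hnil k h
    · exact hmax k hk h

theorem rfind_eq_of_suffix (s sub : List Char) (hsub : sub ≠ []) (h : sub <:+ s) :
    PySem.Chars.rfind s sub = ((s.length - sub.length : Nat) : Int) := by
  have hL : sub.length ≤ s.length := h.length_le
  have hp : sub <+: s.drop (s.length - sub.length) := by
    have hd := List.suffix_iff_eq_drop.mp h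
    rw [← hd]
  rcases rfind_cases s sub hsub with ⟨_, hall⟩ | ⟨j, hj, hle, hpre, hmax⟩
  · exact absurd hp (hall _)
  · have h1 : j ≤ s.length - sub.length := by omega
    have h2 : ¬ j < s.length - sub.length := fun hlt => hmax _ hlt hp
    have : j = s.length - sub.length := by omega
    rw [hj, this]

-- any match of a non-suffix token ends strictly before the end of s
theorem match_end_lt (s sub : List Char) (hsub : sub ≠ []) (hns : ¬ sub <:+ s)
    {j : Nat} (hp : sub <+: s.drop j) : j + sub.length < s.length := by
  have hlen : sub.length ≤ (s.drop j).length := hp.length_le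
  simp only [List.length_drop] at hlen
  have hne : j + sub.length ≠ s.length := by
    intro he
    have hlen2 : (s.drop j).length = sub.length := by simp [List.length_drop]; omega
    have : sub = s.drop j := hp.eq_of_length (by omega)
    exact hns (this ▸ List.drop_suffix j s)
  have hpos : 0 < sub.length := List.length_pos_iff.mpr hsub
  omega

theorem prefix_dropLast_iff (s sub : List Char) (hsub : sub ≠ []) (hns : ¬ sub <:+ s) (j : Nat) :
    sub <+: s.drop j ↔ sub <+: s.dropLast.drop j := by
  have hdt : s.dropLast.drop j = (s.drop j).take (s.length - 1 - j) := by
    rw [List.dropLast_eq_take, List.drop_take]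
  constructor
  · intro hp
    have hjL := match_end_lt s sub hsub hns hp
    rw [List.prefix_iff_eq_take] at hp ⊢
    rw [hdt, List.take_take, min_eq_left (by omega)]
    exact hp
  · intro hp
    exact hp.trans (by rw [hdt]; exact (List.take_prefix _ _))

theorem rfind_dropLast (s sub : List Char) (hsub : sub ≠ []) (hns : ¬ sub <:+ s) :
    PySem.Chars.rfind s sub = PySem.Chars.rfind s.dropLast sub := by
  have hiff := prefix_dropLast_iff s sub hsub hns
  rcases rfind_cases s sub hsub with ⟨h1, hall⟩ | ⟨j, hj, hle, hpre, hmax⟩ <;>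
    rcases rfind_cases s.dropLast sub hsub with ⟨h1', hall'⟩ | ⟨j', hj', hle', hpre', hmax'⟩
  · rw [h1, h1']
  · exact absurd ((hiff j').mpr hpre') (hall j')
  · exact absurd ((hiff j).mp hpre) (hall' j)
  · have hj1 : ¬ j < j' := fun h => hmax j' h ((hiff j').mpr hpre')
    have hj2 : ¬ j' < j := fun h => hmax' j h ((hiff j).mp hpre)
    have : j = j' := by omega
    rw [hj, hj', this]

-- the fold never updates once the best end has reached the string length
theorem fold_frozen (text : String) (ts : List (String × Int)) (st : Int × Option Int)
    (hne : ∀ tv ∈ ts, tv.1.toList ≠ []) (hle : (text.toList.length : Int) ≤ st.1) :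
    List.foldl (bstep text) st ts = st := by
  induction ts with
  | nil => rfl
  | cons tv rest ih =>
    have hstep : bstep text st tv = st := by
      rcases rfind_cases text.toList tv.1.toList (hne tv (List.mem_cons_self)) with
        ⟨h1, _⟩ | ⟨j, hj, hjle, _, _⟩
      · simp [bstep, PySem.Str.rfind_eq, h1]
      · simp only [bstep, PySem.Str.rfind_eq, PySem.Str.len_eq, hj]
        rw [if_neg]
        push_neg
        intro _
        push_cast
        omega
    rw [List.foldl_cons, hstep]
    exact ih (fun tv h => hne tv (List.mem_cons_of_mem _ h))

-- the fold does nothing at all on the empty string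
theorem fold_nil (text : String) (h : text.toList = []) (ts : List (String × Int))
    (st : Int × Option Int) (hne : ∀ tv ∈ ts, tv.1.toList ≠ []) :
    List.foldl (bstep text) st ts = st := by
  induction ts with
  | nil => rfl
  | cons tv rest ih =>
    have hstep : bstep text st tv = st := by
      rcases rfind_cases text.toList tv.1.toList (hne tv (List.mem_cons_self)) with
        ⟨h1, _⟩ | ⟨j, hj, hjle, _, _⟩
      · simp [bstep, PySem.Str.rfind_eq, h1]
      · exfalso
        rw [h] at hjle
        simp only [List.length_nil, Nat.le_zero, Nat.add_eq_zero] at hjle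
        exact hne tv (List.mem_cons_self) (List.length_eq_zero_iff.mp hjle.2)
    rw [List.foldl_cons, hstep]
    exact ih (fun tv h => hne tv (List.mem_cons_of_mem _ h))

-- if A's token scan finds value v, B's fold (started below the string length) ends on value v
theorem fold_match (text : String) (ts : List (String × Int)) :
    ∀ (st : Int × Option Int) (v : Int),
    (∀ tv ∈ ts, tv.1.toList ≠ []) →
    st.1 < (text.toList.length : Int) →
    (processTokenEnd ts text).2 = some v →
    (List.foldl (bstep text) st ts).2 = some v := by
  induction ts with
  | nil => intro st v _ _ hsome; simp [processTokenEnd] at hsome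
  | cons tv rest ih =>
    obtain ⟨k, v'⟩ := tv
    intro st v hne hlt hsome
    have hkne : k.toList ≠ [] := hne (k, v') (List.mem_cons_self)
    by_cases hsuf : k.toList <:+ text.toList
    · have hends : PySem.Chars.endswith text.toList k.toList = true :=
        (PySem.Chars.endswith_iff _ _).mpr hsuf
      simp [processTokenEnd, PySem.Str.endswith_eq, hends] at hsome
      have hr := rfind_eq_of_suffix _ _ hkne hsuf
      have hL : k.toList.length ≤ text.toList.length := hsuf.length_le
      have hstep : bstep text st (k, v') = ((text.toList.length : Int), some v') := by
        simp only [bstep, PySem.Str.rfind_eq, PySem.Str.len_eq, hr]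
        split_ifs with hc
        · simp only [Prod.mk.injEq]
          refine ⟨by omega, trivial⟩
        · exfalso
          apply hc
          refine ⟨by omega, by omega⟩
      rw [List.foldl_cons, hstep,
        fold_frozen text rest _ (fun tv h => hne tv (List.mem_cons_of_mem _ h)) (le_refl _)]
      simp [hsome]
    · have hends : PySem.Chars.endswith text.toList k.toList = false := by
        rw [← Bool.not_eq_true, PySem.Chars.endswith_iff]; exact hsuf
      simp only [processTokenEnd, PySem.Str.endswith_eq, hends, Bool.false_eq_true, ↓reduceIte] at hsome
      rw [List.foldl_cons]
      refine ih _ v (fun tv h => hne tv (List.mem_cons_of_mem _ h)) ?_ hsome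
      rcases rfind_cases text.toList k.toList hkne with ⟨h1, _⟩ | ⟨j, hj, _, hpre, _⟩
      · simp [bstep, PySem.Str.rfind_eq, h1]; exact hlt
      · have hend := match_end_lt _ _ hkne hsuf hpre
        simp only [bstep, PySem.Str.rfind_eq, PySem.Str.len_eq, hj]
        split_ifs with hc
        · simp only
          push_cast
          omega
        · exact hlt
-- if no token is a suffix, the fold over text equals the fold over text minus its last char
theorem fold_dropLast (text text' : String) (h : text'.toList = text.toList.dropLast)
    (ts : List (String × Int)) (st : Int × Option Int)
    (hne : ∀ tv ∈ ts, tv.1.toList ≠ []) (hns : ∀ tv ∈ ts, ¬ tv.1.toList <:+ text.toList) :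
    List.foldl (bstep text) st ts = List.foldl (bstep text') st ts := by
  induction ts generalizing st with
  | nil => rfl
  | cons tv rest ih =>
    have hr : PySem.Str.rfind text tv.1 = PySem.Str.rfind text' tv.1 := by
      rw [PySem.Str.rfind_eq, PySem.Str.rfind_eq, h]
      exact rfind_dropLast _ _ (hne tv (List.mem_cons_self)) (hns tv (List.mem_cons_self))
    have hstep : bstep text st tv = bstep text' st tv := by
      simp only [bstep, hr]
    rw [List.foldl_cons, List.foldl_cons, hstep]
    exact ih _ (fun tv h => hne tv (List.mem_cons_of_mem _ h))
      (fun tv h => hns tv (List.mem_cons_of_mem _ h))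

-- when A's scan finds nothing, no token is a suffix
theorem processTokenEnd_none_suffix (ts : List (String × Int)) (text : String)
    (h : (processTokenEnd ts text).2 = none) :
    ∀ tv ∈ ts, ¬ tv.1.toList <:+ text.toList := by
  induction ts with
  | nil => intro tv htv; simp at htv
  | cons tv rest ih =>
    obtain ⟨k, v⟩ := tv
    by_cases he : PySem.Chars.endswith text.toList k.toList = true
    · simp [processTokenEnd, PySem.Str.endswith_eq, he] at h
    · simp only [processTokenEnd, PySem.Str.endswith_eq, he, Bool.false_eq_true, ↓reduceIte] at h
      intro tv htv
      rcases List.mem_cons.mp htv with rfl | hm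
      · simp only
        rw [← PySem.Chars.endswith_iff]
        exact he
      · exact ih h tv hm

theorem tokensTable_nonempty : ∀ tv ∈ tokensTable, tv.1.toList ≠ [] := by decide

theorem main_equiv : ∀ (text : String), process_line_backward text = process_line_backward_alt text := by
  suffices H : ∀ (n : Nat) (text : String), text.toList.length = n →
      process_line_backward text = process_line_backward_alt text by
    intro text; exact H _ text rfl
  intro n
  induction n using Nat.strong_induction_on with
  | _ n ih =>
    intro text hn
    rw [process_line_backward.eq_def]
    by_cases h0 : 0 < PySem.Str.len text
    · rw [dif_pos h0]
      rw [PySem.Str.len_eq] at h0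
      split
      · rename_i fst v heq
        have hsome : (processTokenEnd tokensTable text).2 = some v := by rw [heq]
        have := fold_match text tokensTable (-1, none) v tokensTable_nonempty
          (by simp only; omega) hsome
        unfold process_line_backward_alt
        rw [this]
      · rename_i substring heq
        have hnone : (processTokenEnd tokensTable text).2 = none := by rw [heq]
        have h1 := processTokenEnd_none_fst tokensTable text hnone
        rw [heq] at h1
        simp only at h1
        have hlist : substring.toList = text.toList.dropLast := by
          rw [h1]
          simp [PySem.Str.toList_slice, PySem.List.slice_zero_start, PySem.List.slice_to_neg_one]
        have hIH := ih (n - 1) (by omega) substring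
          (by rw [hlist, List.length_dropLast, hn])
        rw [hIH]
        unfold process_line_backward_alt
        rw [fold_dropLast text substring hlist tokensTable (-1, none) tokensTable_nonempty
          (processTokenEnd_none_suffix tokensTable text hnone)]
    · rw [dif_neg h0]
      rw [PySem.Str.len_eq] at h0
      have hlist : text.toList = [] := by
        have : text.toList.length = 0 := by omega
        exact List.length_eq_zero_iff.mp this
      unfold process_line_backward_alt
      rw [fold_nil text hlist tokensTable (-1, none) tokensTable_nonempty]

-- ===== VERDICT (by name: the statement is the Claim_ definition above) =====
theorem process_line_backward_spec : Claim_equal_process_line_backward := by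
  intro text _
  unfold Spec_process_line_backward
  exact main_equiv text
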